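-- pv_equiv track=rewrite | github.com/PuuuuRp/EGE | Homework/To 26-01-25/T8.py | f
-- ===== SOURCE A (Python) =====
-- def f(val):
--     for i in '02468a':
--         val = val.replace(i, '0')
--     for i in '13579b':
--         val = val.replace(i, '1')
--     if val == '1010101' or val == '0101010':
--         return True
--     return False
-- ===== SOURCE B (Python) =====
-- def f(val):
--     # length-7 + adjacent-classes-alternate check; never builds the normalised string
--     if len(val) != 7:
--         return False
--     prev = None
--     for ch in val:
--         if ch in '13579b':
--             b = True
--         elif ch in '02468a':
--             b = False
--         else:
--             return False
--         if b == prev: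
--             return False
--         prev = b
--     return True
-- ===== Notes on version B (the rewrite author's own statement) =====
-- stated objective: simpler
-- what changed: Instead of rewriting the string with twelve replace passes and comparing it to two literal patterns, B never builds any string: it checks len==7 and, in one early-exit pass, that every character is digit-class-mappable and consecutive characters alternate in parity class.
import Mathlib
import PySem

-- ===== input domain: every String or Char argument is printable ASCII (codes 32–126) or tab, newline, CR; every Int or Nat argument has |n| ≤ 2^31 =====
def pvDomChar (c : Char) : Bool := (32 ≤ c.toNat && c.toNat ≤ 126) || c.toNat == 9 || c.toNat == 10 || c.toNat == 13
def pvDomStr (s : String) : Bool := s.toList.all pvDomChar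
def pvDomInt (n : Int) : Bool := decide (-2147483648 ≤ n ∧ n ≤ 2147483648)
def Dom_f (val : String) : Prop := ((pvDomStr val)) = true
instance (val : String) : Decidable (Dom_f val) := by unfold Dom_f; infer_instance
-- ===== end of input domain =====

-- B never builds the normalised string: it checks len == 7 and, in one early-exit pass,
-- that every character is mappable and consecutive characters alternate in class (objective: simpler).

-- ===== PORT A =====
-- for i in '02468a': val = val.replace(i, '0');  for i in '13579b': val = val.replace(i, '1')
def f (val : String) : Bool :=
  let v1 := "02468a".toList.foldl (fun v i => PySem.Str.replace v (String.singleton i) "0") val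
  let v2 := "13579b".toList.foldl (fun v i => PySem.Str.replace v (String.singleton i) "1") v1
  if v2 = "1010101" ∨ v2 = "0101010" then true else false

-- ===== PORT B =====
-- if ch in '13579b': b = True  elif ch in '02468a': b = False  else: return False
def bclass (ch : Char) : Option Bool :=
  if PySem.Str.isIn (String.singleton ch) "13579b" then some true
  else if PySem.Str.isIn (String.singleton ch) "02468a" then some false
  else none

-- the for-loop with early returns; prev : Option Bool (None / True / False)
def loopB (prev : Option Bool) : List Char → Bool
  | [] => true
  | ch :: t =>
    match bclass ch with
    | none => false
    | some b => if some b = prev then false else loopB (some b) t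

def f_alt (val : String) : Bool :=
  if PySem.Str.len val ≠ 7 then false else loopB none val.toList

-- ===== PRECONDITION & SPEC =====
def Spec_f (val : String) (out : Bool) : Prop := out = f_alt val
instance (val : String) (out : Bool) : Decidable (Spec_f val out) := by unfold Spec_f; infer_instance

-- ===== CLAIM (what is proved, stated in full; the proofs are below) =====
def Claim_equal_f : Prop := ∀ (val : String), Dom_f val → Spec_f val (f val)

-- ===== LEMMAS AND PROOFS =====

-- the effect of one single-char replace, as a pointwise substitution
def sub (c d x : Char) : Char := if x = c then d else x

lemma go_single (c d : Char) (l : List Char) : ∀ (fuel : Nat) (acc : List Char), l.length ≤ fuel →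
    PySem.Chars.replace.go [c] [d] fuel l acc = acc.reverse ++ l.map (sub c d) := by
  induction l with
  | nil => intro fuel acc _; cases fuel <;> simp [PySem.Chars.replace.go]
  | cons x t ih =>
    intro fuel acc h
    cases fuel with
    | zero => simp at h
    | succ n =>
      rw [PySem.Chars.replace.go]
      by_cases hx : x = c
      · subst hx
        have hp : [x].isPrefixOf (x :: t) = true := by simp [List.isPrefixOf]
        rw [hp]
        simp only [if_true, List.length_cons, List.length_nil, Nat.zero_add,
          List.drop_succ_cons, List.drop_zero, List.reverse_singleton, List.singleton_append]
        rw [ih n _ (by simpa using h)]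
        simp [sub]
      · have hp : [c].isPrefixOf (x :: t) = false := by
          simp [List.isPrefixOf]
          exact Ne.symm hx
        rw [hp]
        simp only [Bool.false_eq_true, if_false]
        rw [ih n _ (by simpa using h)]
        simp [sub, hx]

lemma replace_single (c d : Char) (s : String) :
    PySem.Str.replace s (String.singleton c) (String.singleton d)
      = String.ofList (s.toList.map (sub c d)) := by
  simp [PySem.Str.replace, PySem.Chars.replace, go_single]

-- the normalised character A's twelve substitutions produce
def gnorm (ch : Char) : Char :=
  if PySem.Str.isIn (String.singleton ch) "13579b" then '1'
  else if PySem.Str.isIn (String.singleton ch) "02468a" then '0'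
  else ch

lemma pointwise (x : Char) :
    sub 'b' '1' (sub '9' '1' (sub '7' '1' (sub '5' '1' (sub '3' '1' (sub '1' '1'
      (sub 'a' '0' (sub '8' '0' (sub '6' '0' (sub '4' '0' (sub '2' '0' (sub '0' '0' x)))))))))))
      = gnorm x := by
  by_cases h0 : x = '0'; · subst h0; decide
  by_cases h1 : x = '1'; · subst h1; decide
  by_cases h2 : x = '2'; · subst h2; decide
  by_cases h3 : x = '3'; · subst h3; decide
  by_cases h4 : x = '4'; · subst h4; decide
  by_cases h5 : x = '5'; · subst h5; decide
  by_cases h6 : x = '6'; · subst h6; decide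
  by_cases h7 : x = '7'; · subst h7; decide
  by_cases h8 : x = '8'; · subst h8; decide
  by_cases h9 : x = '9'; · subst h9; decide
  by_cases ha : x = 'a'; · subst ha; decide
  by_cases hb : x = 'b'; · subst hb; decide
  have hin1 : PySem.Chars.isIn [x] ['1', '3', '5', '7', '9', 'b'] = false := by
    rw [PySem.Chars.isIn_eq_false_iff]
    intro hinf
    have := hinf.sublist.subset (List.mem_singleton_self x)
    simp at this
    tauto
  have hin0 : PySem.Chars.isIn [x] ['0', '2', '4', '6', '8', 'a'] = false := by
    rw [PySem.Chars.isIn_eq_false_iff]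
    intro hinf
    have := hinf.sublist.subset (List.mem_singleton_self x)
    simp at this
    tauto
  simp [sub, gnorm, h0, h1, h2, h3, h4, h5, h6, h7, h8, h9, ha, hb, hin1, hin0]

-- A's whole pipeline is one map of gnorm
lemma f_as_norm (val : String) :
    f val = ((String.ofList (val.toList.map gnorm) = "1010101")
          || (String.ofList (val.toList.map gnorm) = "0101010")) := by
  have h0 : ("0" : String) = String.singleton '0' := rfl
  have h1 : ("1" : String) = String.singleton '1' := rfl
  simp only [f, h0, h1, show "02468a".toList = ['0','2','4','6','8','a'] from rfl,
    show "13579b".toList = ['1','3','5','7','9','b'] from rfl, List.foldl]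
  simp only [replace_single, String.toList_ofList, List.map_map]
  have : (val.toList.map (sub 'b' '1' ∘ sub '9' '1' ∘ sub '7' '1' ∘ sub '5' '1' ∘ sub '3' '1' ∘
      sub '1' '1' ∘ sub 'a' '0' ∘ sub '8' '0' ∘ sub '6' '0' ∘ sub '4' '0' ∘ sub '2' '0' ∘
      sub '0' '0')) = val.toList.map gnorm := by
    refine List.map_congr_left fun x _ => ?_
    simpa using pointwise x
  rw [this]
  by_cases hA : String.ofList (val.toList.map gnorm) = "1010101" <;>
    by_cases hB : String.ofList (val.toList.map gnorm) = "0101010" <;>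
      simp [hA, hB]

-- bridges between gnorm and bclass
lemma bridge1 (c : Char) : gnorm c = '1' ↔ bclass c = some true := by
  unfold gnorm bclass
  simp only [PySem.Str.isIn_eq, String.toList_singleton]
  by_cases h1 : PySem.Chars.isIn [c] ['1', '3', '5', '7', '9', 'b'] = true
  · simp [h1]
  · by_cases h0 : PySem.Chars.isIn [c] ['0', '2', '4', '6', '8', 'a'] = true
    · simp [h1, h0]
    · have hc : c ≠ '1' := by
        intro h; subst h; exact h1 (by decide)
      simp [h1, h0, hc]

lemma bridge0 (c : Char) : gnorm c = '0' ↔ bclass c = some false := by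
  unfold gnorm bclass
  simp only [PySem.Str.isIn_eq, String.toList_singleton]
  by_cases h1 : PySem.Chars.isIn [c] ['1', '3', '5', '7', '9', 'b'] = true
  · simp [h1]
  · by_cases h0 : PySem.Chars.isIn [c] ['0', '2', '4', '6', '8', 'a'] = true
    · simp [h1, h0]
    · have hc : c ≠ '0' := by
        intro h; subst h; exact h0 (by decide)
      simp [h1, h0, hc]

-- the alternating pattern of given length starting with bit b
def bitChar (b : Bool) : Char := if b then '1' else '0'

def altFrom (b : Bool) : Nat → List Char
  | 0 => []
  | n + 1 => bitChar b :: altFrom (!b) n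

lemma bridge_bit (c : Char) (b : Bool) :
    gnorm c = bitChar b ↔ bclass c = some b := by
  cases b
  · simpa [bitChar] using bridge0 c
  · simpa [bitChar] using bridge1 c

lemma loopB_some (l : List Char) : ∀ (b : Bool),
    loopB (some b) l = decide (l.map gnorm = altFrom (!b) l.length) := by
  induction l with
  | nil => intro b; simp [loopB, altFrom]
  | cons c t ih =>
    intro b
    cases hcb : bclass c with
    | none =>
      have hne : gnorm c ≠ bitChar (!b) := by
        intro h
        rw [bridge_bit] at h
        simp [hcb] at h
      simp [loopB, hcb, altFrom, hne]
    | some b' =>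
      by_cases hb : b' = b
      · subst hb
        have hne : gnorm c ≠ bitChar (!b') := by
          intro h
          rw [bridge_bit, hcb] at h
          simp only [Option.some.injEq] at h
          exact (Bool.not_ne_self b') h.symm
        simp [loopB, hcb, altFrom, hne]
      · have hb' : b' = !b := by cases b <;> cases b' <;> simp_all
        subst hb'
        have hg : gnorm c = bitChar (!b) := (bridge_bit c (!b)).mpr hcb
        have hne : ¬ (some (!b) = some b) := by
          simp only [Option.some.injEq]
          exact fun h => (Bool.not_ne_self b) h
        simp [loopB, hcb, hne, ih (!b), altFrom, hg]

lemma loopB_none (l : List Char) :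
    loopB none l = decide (l.map gnorm = altFrom true l.length
                         ∨ l.map gnorm = altFrom false l.length) := by
  cases l with
  | nil => simp [loopB, altFrom]
  | cons c t =>
    cases hcb : bclass c with
    | none =>
      have h1 : gnorm c ≠ bitChar true := by
        intro h; rw [bridge_bit] at h; simp [hcb] at h
      have h0 : gnorm c ≠ bitChar false := by
        intro h; rw [bridge_bit] at h; simp [hcb] at h
      simp [loopB, hcb, altFrom, h1, h0]
    | some b =>
      have hg : gnorm c = bitChar b := (bridge_bit c b).mpr hcb
      have hstep : loopB none (c :: t) = loopB (some b) t := by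
        simp [loopB, hcb]
      rw [hstep, loopB_some]
      cases b
      · have h1 : gnorm c ≠ bitChar true := by rw [hg]; decide
        have hbc : bitChar false ≠ bitChar true := by decide
        simp [altFrom, hg, hbc]
      · have h0 : gnorm c ≠ bitChar false := by rw [hg]; decide
        have hbc : bitChar true ≠ bitChar false := by decide
        simp [altFrom, hg, hbc]

lemma f_eq (val : String) : f val = f_alt val := by
  rw [f_as_norm]
  unfold f_alt
  have hlen : PySem.Str.len val = (val.toList.length : Int) := by simp [PySem.Str.len]
  by_cases h7 : val.toList.length = 7
  · have hc : ¬ (PySem.Str.len val ≠ 7) := by rw [hlen, h7]; simp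
    rw [if_neg hc, loopB_none, h7]
    have e1 : altFrom true 7 = "1010101".toList := by decide
    have e0 : altFrom false 7 = "0101010".toList := by decide
    rw [e1, e0]
    have s1 : (String.ofList (val.toList.map gnorm) = "1010101")
        ↔ (val.toList.map gnorm = "1010101".toList) := by
      constructor
      · intro h; rw [← h]; simp
      · intro h; rw [h]; rfl
    have s0 : (String.ofList (val.toList.map gnorm) = "0101010")
        ↔ (val.toList.map gnorm = "0101010".toList) := by
      constructor
      · intro h; rw [← h]; simp
      · intro h; rw [h]; rfl
    by_cases hA : val.toList.map gnorm = "1010101".toList <;>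
      by_cases hB : val.toList.map gnorm = "0101010".toList <;>
        simp [hA, hB, s1, s0]
  · have hc : PySem.Str.len val ≠ 7 := by
      rw [hlen]; exact_mod_cast h7
    rw [if_pos hc]
    have hA : String.ofList (val.toList.map gnorm) ≠ "1010101" := by
      intro h
      have := congrArg (fun s => s.toList.length) h
      simp at this
      exact h7 (by simpa using this)
    have hB : String.ofList (val.toList.map gnorm) ≠ "0101010" := by
      intro h
      have := congrArg (fun s => s.toList.length) h
      simp at this
      exact h7 (by simpa using this)
    simp [hA, hB]

-- ===== VERDICT (by name: the statement is the Claim_ definition above) =====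
theorem f_spec : Claim_equal_f := by
  intro val _
  unfold Spec_f
  exact f_eq val
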